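-- pv_equiv track=rewrite | github.com/antontomusiak/TopCoder | srm663/chess_floor.py | minimumChanges
-- ===== SOURCE A (Python) =====
-- def minimumChanges(floor):
-- 	minChanges = len(floor)**2
-- 	tiles = list(set(''.join(floor)))
-- 	if len(tiles) == 1: tiles.append('A')
-- 	for i in range(len(tiles) - 1):
-- 		for j in range(i+1, len(tiles)):
-- 			minFix1, minFix2 = 0, 0
-- 			for k in range(0, len(floor), 2):
-- 				for l in range(len(floor[k])):
-- 					if l % 2 == 0 and floor[k][l] != tiles[i]: minFix1 += 1
-- 					if l % 2 == 1 and floor[k][l] != tiles[j]: minFix1 += 1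
-- 					if l % 2 == 0 and floor[k][l] != tiles[j]: minFix2 += 1
-- 					if l % 2 == 1 and floor[k][l] != tiles[i]: minFix2 += 1
--
-- 			for k in range(1, len(floor), 2):
-- 				for l in range(len(floor[k])):
-- 					if l % 2 == 0 and floor[k][l] != tiles[j]: minFix1 += 1
-- 					if l % 2 == 1 and floor[k][l] != tiles[i]: minFix1 += 1
-- 					if l % 2 == 0 and floor[k][l] != tiles[i]: minFix2 += 1
-- 					if l % 2 == 1 and floor[k][l] != tiles[j]: minFix2 += 1
--
-- 			minChanges = min(minChanges, minFix1, minFix2)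
--
-- 	return minChanges
-- ===== SOURCE B (Python) =====
-- def minimumChanges(floor):
--     even = []
--     odd = []
--     for k, row in enumerate(floor):
--         for l, c in enumerate(row):
--             if (k + l) % 2 == 0:
--                 even.append(c)
--             else:
--                 odd.append(c)
--     cnt0 = {}
--     for c in even:
--         cnt0[c] = cnt0.get(c, 0) + 1
--     cnt1 = {}
--     for c in odd:
--         cnt1[c] = cnt1.get(c, 0) + 1
--     tiles = list(set(''.join(floor)))
--     if len(tiles) == 1:
--         tiles.append('A')
--     best = len(floor) ** 2
--     for i in range(len(tiles) - 1):
--         for j in range(i + 1, len(tiles)):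
--             a, b = tiles[i], tiles[j]
--             fix1 = (len(even) - cnt0.get(a, 0)) + (len(odd) - cnt1.get(b, 0))
--             fix2 = (len(even) - cnt0.get(b, 0)) + (len(odd) - cnt1.get(a, 0))
--             best = min(best, fix1, fix2)
--     return best
-- ===== Notes on version B (the rewrite author's own statement) =====
-- stated objective: faster
-- what changed: B makes one pass over the grid collecting the characters of the two diagonal parity classes and builds a frequency dictionary per class, so each tile pair costs O(1) via count arithmetic instead of A's full O(N^2) rescan of the grid per pair.
import Mathlib
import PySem

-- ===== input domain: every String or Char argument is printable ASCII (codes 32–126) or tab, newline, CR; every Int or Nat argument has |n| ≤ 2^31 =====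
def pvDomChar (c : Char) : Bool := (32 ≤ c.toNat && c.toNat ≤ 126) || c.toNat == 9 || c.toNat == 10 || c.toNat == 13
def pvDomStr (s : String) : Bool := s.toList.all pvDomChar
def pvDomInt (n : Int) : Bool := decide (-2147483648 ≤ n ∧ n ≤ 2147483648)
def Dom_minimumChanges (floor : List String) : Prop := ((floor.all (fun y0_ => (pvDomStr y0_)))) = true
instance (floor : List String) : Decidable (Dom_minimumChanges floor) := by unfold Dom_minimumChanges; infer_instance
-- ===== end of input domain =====

-- B replaces A's per-tile-pair O(N^2) rescan of the grid by one pass collecting the two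
-- diagonal parity classes plus per-class frequency dictionaries, making each pair O(1) (faster, asymptotic).

-- ===== PORT A =====
-- tiles = list(set(''.join(floor))); if len(tiles)==1: tiles.append('A')
-- (list(set(..)) order is CPython-hash dependent; the returned Int does not depend on it)
def pyTiles (floor : List String) : List Char :=
  let tiles : List Char := PySem.Set.ofList (floor.map String.toList).flatten
  if tiles.length == 1 then tiles ++ ['A'] else tiles

-- the four 'if' statements of A's inner cell loop, grouped by the variable they increment:
-- aCell row x y l = contribution of cell l to the accumulator whose even-column tile is x and odd-column tile is y
def aCell (row : List Char) (x y : Char) (l : Nat) : Int :=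
  (if l % 2 == 0 && row.getD l ' ' != x then 1 else 0) +
  (if l % 2 == 1 && row.getD l ' ' != y then 1 else 0)

-- body of 'for k in range(…, len(floor), 2): for l in range(len(floor[k])): …' for one row index k
def aRowPair (floor : List String) (x y : Char) (st : Int × Int) (k : Int) : Int × Int :=
  let row := (PySem.List.pyGetD floor k "").toList
  (List.range row.length).foldl (fun st l => (st.1 + aCell row x y l, st.2 + aCell row y x l)) st

-- (minFix1, minFix2) for the pair (a, b) = (tiles[i], tiles[j])
def pyAFix (floor : List String) (a b : Char) : Int × Int :=
  (PySem.List.pyRange 1 (PySem.List.len floor) 2).foldl (aRowPair floor b a)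
    ((PySem.List.pyRange 0 (PySem.List.len floor) 2).foldl (aRowPair floor a b) (0, 0))

def minimumChanges (floor : List String) : Int :=
  let minChanges : Int := (PySem.List.len floor) ^ 2
  let tiles := pyTiles floor
  (List.range (tiles.length - 1)).foldl (fun mc i =>
    (List.range' (i + 1) (tiles.length - (i + 1))).foldl (fun mc j =>
      let f := pyAFix floor (tiles.getD i 'A') (tiles.getD j 'A')
      min (min mc f.1) f.2) mc) minChanges

-- ===== PORT B =====
-- one pass over the grid: (chars on cells with (k+l)%2 == 0, chars on the other cells)
def pyCells (floor : List String) : List Char × List Char :=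
  (PySem.List.enumerate floor).foldl (fun eo kr =>
    (PySem.List.enumerate kr.2.toList).foldl (fun eo lc =>
      if PySem.Int.mod (kr.1 + lc.1) 2 == 0 then (eo.1 ++ [lc.2], eo.2) else (eo.1, eo.2 ++ [lc.2]))
      eo) ([], [])

-- cnt[c] = cnt.get(c, 0) + 1 over a list of chars
def pyCounter (xs : List Char) : PySem.Dict Char Int :=
  xs.foldl (fun d c => d.insert c (d.getD c 0 + 1)) PySem.Dict.empty

def minimumChanges_alt (floor : List String) : Int :=
  let eo := pyCells floor
  let cnt0 := pyCounter eo.1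
  let cnt1 := pyCounter eo.2
  let tiles := pyTiles floor
  let best : Int := (PySem.List.len floor) ^ 2
  (List.range (tiles.length - 1)).foldl (fun best i =>
    (List.range' (i + 1) (tiles.length - (i + 1))).foldl (fun best j =>
      let a := tiles.getD i 'A'
      let b := tiles.getD j 'A'
      let fix1 := (PySem.List.len eo.1 - cnt0.getD a 0) + (PySem.List.len eo.2 - cnt1.getD b 0)
      let fix2 := (PySem.List.len eo.1 - cnt0.getD b 0) + (PySem.List.len eo.2 - cnt1.getD a 0)
      min (min best fix1) fix2) best) best

-- ===== PRECONDITION & SPEC =====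
def Spec_minimumChanges (floor : List String) (out : Int) : Prop := out = minimumChanges_alt floor
instance (floor : List String) (out : Int) : Decidable (Spec_minimumChanges floor out) := by unfold Spec_minimumChanges; infer_instance

-- ===== CLAIM (what is proved, stated in full; the proofs are below) =====
def Claim_equal_minimumChanges : Prop := ∀ (floor : List String), Dom_minimumChanges floor → Spec_minimumChanges floor (minimumChanges floor)

-- ===== LEMMAS AND PROOFS =====

-- 1: counter
theorem counter_getD (xs : List Char) (c : Char) : (pyCounter xs).getD c 0 = (xs.count c : Int) := by
  simp [pyCounter, PySem.Dict.getD_foldl_insert_add_one]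

-- row sum on the A side
def aRowSum (floor : List String) (x y : Char) (k : Int) : Int :=
  ((List.range (PySem.List.pyGetD floor k "").toList.length).map
    (aCell (PySem.List.pyGetD floor k "").toList x y)).sum

theorem aRowPair_eq (floor : List String) (x y : Char) (st : Int × Int) (k : Int) :
    aRowPair floor x y st k = (st.1 + aRowSum floor x y k, st.2 + aRowSum floor y x k) := by
  unfold aRowPair aRowSum
  rw [PySem.List.foldl_prod_mk (f := fun s l => s + aCell (PySem.List.pyGetD floor k "").toList x y l)
      (g := fun s l => s + aCell (PySem.List.pyGetD floor k "").toList y x l)]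
  rw [PySem.List.foldl_add, PySem.List.foldl_add]

theorem pyAFix_eq (floor : List String) (a b : Char) :
    pyAFix floor a b =
      (((PySem.List.pyRange 0 (PySem.List.len floor) 2).map (aRowSum floor a b)).sum
        + ((PySem.List.pyRange 1 (PySem.List.len floor) 2).map (aRowSum floor b a)).sum,
       ((PySem.List.pyRange 0 (PySem.List.len floor) 2).map (aRowSum floor b a)).sum
        + ((PySem.List.pyRange 1 (PySem.List.len floor) 2).map (aRowSum floor a b)).sum) := by
  unfold pyAFix
  rw [PySem.List.foldl_congr_mem _ (aRowPair floor a b)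
      (fun st k => (st.1 + aRowSum floor a b k, st.2 + aRowSum floor b a k)) _
      (fun st k _ => aRowPair_eq floor a b st k),
    PySem.List.foldl_congr_mem _ (aRowPair floor b a)
      (fun st k => (st.1 + aRowSum floor b a k, st.2 + aRowSum floor a b k)) _
      (fun st k _ => aRowPair_eq floor b a st k)]
  rw [PySem.List.foldl_prod_mk (f := fun s k => s + aRowSum floor a b k)
      (g := fun s k => s + aRowSum floor b a k),
    PySem.List.foldl_prod_mk (f := fun s k => s + aRowSum floor b a k)
      (g := fun s k => s + aRowSum floor a b k)]
  rw [PySem.List.foldl_add, PySem.List.foldl_add, PySem.List.foldl_add, PySem.List.foldl_add]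
  simp

-- 2: cells characterization
def cellP (k l : Int) : Bool := PySem.Int.mod (k + l) 2 == 0

theorem cells_row (k : Int) (s : List Char) (eo : List Char × List Char) :
    (PySem.List.enumerate s).foldl (fun eo lc =>
      if PySem.Int.mod (k + lc.1) 2 == 0 then (eo.1 ++ [lc.2], eo.2) else (eo.1, eo.2 ++ [lc.2])) eo
    = (eo.1 ++ ((PySem.List.enumerate s).filter (fun lc => cellP k lc.1)).map (·.2),
       eo.2 ++ ((PySem.List.enumerate s).filter (fun lc => !cellP k lc.1)).map (·.2)) := by
  rw [PySem.List.foldl_congr_mem _ _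
      (fun (eo : List Char × List Char) (lc : Int × Char) =>
        (if cellP k lc.1 then eo.1 ++ [lc.2] else eo.1,
         if cellP k lc.1 then eo.2 else eo.2 ++ [lc.2])) _
      (by intro acc lc _; by_cases h : cellP k lc.1 <;> simp [cellP] at h <;> simp [cellP, h])]
  rw [PySem.List.foldl_prod_mk
      (f := fun (e : List Char) (lc : Int × Char) => if cellP k lc.1 then e ++ [lc.2] else e)
      (g := fun (o : List Char) (lc : Int × Char) => if cellP k lc.1 then o else o ++ [lc.2])]
  rw [PySem.List.foldl_append_if]
  rw [PySem.List.foldl_congr_mem _ _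
      (fun (o : List Char) (lc : Int × Char) => if !cellP k lc.1 then o ++ [lc.2] else o) _
      (by intro acc lc _; by_cases h : cellP k lc.1 <;> simp [h])]
  rw [PySem.List.foldl_append_if]

theorem cells_eq (floor : List String) :
    pyCells floor =
      ((PySem.List.enumerate floor).flatMap (fun kr =>
         ((PySem.List.enumerate kr.2.toList).filter (fun lc => cellP kr.1 lc.1)).map (·.2)),
       (PySem.List.enumerate floor).flatMap (fun kr =>
         ((PySem.List.enumerate kr.2.toList).filter (fun lc => !cellP kr.1 lc.1)).map (·.2))) := by
  unfold pyCells
  rw [PySem.List.foldl_congr_mem _ _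
      (fun (eo : List Char × List Char) (kr : Int × String) =>
        (eo.1 ++ ((PySem.List.enumerate kr.2.toList).filter (fun lc => cellP kr.1 lc.1)).map (·.2),
         eo.2 ++ ((PySem.List.enumerate kr.2.toList).filter (fun lc => !cellP kr.1 lc.1)).map (·.2))) _
      (fun eo kr _ => cells_row kr.1 kr.2.toList eo)]
  rw [PySem.List.foldl_prod_mk
      (f := fun (e : List Char) (kr : Int × String) =>
        e ++ ((PySem.List.enumerate kr.2.toList).filter (fun lc => cellP kr.1 lc.1)).map (·.2))
      (g := fun (o : List Char) (kr : Int × String) =>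
        o ++ ((PySem.List.enumerate kr.2.toList).filter (fun lc => !cellP kr.1 lc.1)).map (·.2))]
  rw [PySem.List.foldl_append_eq_flatMap, PySem.List.foldl_append_eq_flatMap]
  simp

-- 3: step-2 ranges over a Nat bound
theorem pyRange02_eq (n : Nat) :
    PySem.List.pyRange 0 (n : Int) 2 = (List.range ((n + 1) / 2)).map (fun k => ((2 * k : Nat) : Int)) := by
  rw [PySem.List.pyRange_of_pos _ _ (by norm_num)]
  rcases Nat.eq_zero_or_pos n with h | h
  · subst h; simp
  · have h1 : (0 : Int) < (n : Int) := by exact_mod_cast h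
    rw [if_pos h1]
    have h2 : ((n : Int) - 0 + 2 - 1) / 2 = (((n + 1) / 2 : Nat) : Int) := by
      rw [Int.natCast_div]; push_cast; ring_nf
    rw [h2, Int.toNat_natCast]
    apply List.map_congr_left
    intro k _
    push_cast; ring

theorem pyRange12_eq (n : Nat) :
    PySem.List.pyRange 1 (n : Int) 2 = (List.range (n / 2)).map (fun k => ((2 * k + 1 : Nat) : Int)) := by
  rw [PySem.List.pyRange_of_pos _ _ (by norm_num)]
  by_cases h1 : (1 : Int) < (n : Int)
  · rw [if_pos h1]
    have h2 : ((n : Int) - 1 + 2 - 1) / 2 = ((n / 2 : Nat) : Int) := by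
      rw [Int.natCast_div]; push_cast; ring_nf
    rw [h2, Int.toNat_natCast]
    apply List.map_congr_left
    intro k _
    push_cast; ring
  · rw [if_neg h1]
    have hn : n ≤ 1 := by exact_mod_cast Int.not_lt.mp h1
    have : n / 2 = 0 := by omega
    simp [this]

theorem merge_aux (n : Nat) (f g : Int → Int) :
    ((List.range ((n + 1) / 2)).map (fun k : Nat => f ((2 * k : Nat) : Int))).sum
      + ((List.range (n / 2)).map (fun k : Nat => g ((2 * k + 1 : Nat) : Int))).sum
    = ((List.range n).map (fun k : Nat => if k % 2 = 0 then f (k : Int) else g (k : Int))).sum := by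
  induction n with
  | zero => simp
  | succ m ih =>
    by_cases hm : m % 2 = 0
    · have he : (m + 1 + 1) / 2 = (m + 1) / 2 + 1 := by omega
      have ho : (m + 1) / 2 = m / 2 := by omega
      have hfm : (2 * (m / 2) : Nat) = m := by omega
      rw [he, ho, List.range_succ, List.range_succ, List.map_append, List.map_append,
        List.sum_append, List.sum_append]
      rw [ho] at ih
      rw [← ih]
      simp only [List.map_cons, List.map_nil, List.sum_cons, List.sum_nil, add_zero]
      rw [if_pos hm, hfm]
      ring
    · have he : (m + 1 + 1) / 2 = (m + 1) / 2 := by omega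
      have ho : (m + 1) / 2 = m / 2 + 1 := by omega
      have hgm : (2 * (m / 2) + 1 : Nat) = m := by omega
      rw [he]
      nth_rewrite 2 [ho]
      rw [List.range_succ, List.range_succ, List.map_append, List.map_append,
        List.sum_append, List.sum_append, ← ih]
      simp only [List.map_cons, List.map_nil, List.sum_cons, List.sum_nil, add_zero]
      rw [if_neg hm, hgm]
      ring

theorem merge_parity (n : Nat) (f g : Int → Int) :
    ((PySem.List.pyRange 0 (n : Int) 2).map f).sum + ((PySem.List.pyRange 1 (n : Int) 2).map g).sum
    = ((List.range n).map (fun k : Nat => if k % 2 = 0 then f (k : Int) else g (k : Int))).sum := by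
  rw [pyRange02_eq, pyRange12_eq, List.map_map, List.map_map, ← merge_aux n f g]
  rfl

-- Σ of pointwise differences (no Mathlib list lemma found for this exact shape)
theorem sum_map_sub_int (l : List Nat) (f g : Nat → Int) :
    (l.map (fun x => f x - g x)).sum = (l.map f).sum - (l.map g).sum := by
  induction l with
  | nil => simp
  | cons x xs ih => simp [ih]; ring

-- countP arithmetic: mismatches on a parity class = class size minus matches
theorem cnt_split (L : List Nat) (p : Nat → Bool) (c : Nat → Char) (a : Char) :
    (L.countP (fun l => p l && (c l != a)) : Int)
      = (L.countP p : Int) - (L.countP (fun l => (c l == a) && p l) : Int) := by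
  have h := List.length_eq_countP_add_countP (fun l => c l == a) (l := L.filter p)
  rw [← List.countP_eq_length_filter, List.countP_filter, List.countP_filter] at h
  have h2 : L.countP (fun l => decide ¬((c l == a) = true) && p l)
      = L.countP (fun l => p l && (c l != a)) := by
    apply List.countP_congr
    intro x _
    cases hp : p x <;> cases hc : c x == a <;> simp_all
  rw [h2] at h
  omega

def rowE (k : Int) (s : List Char) : List Char :=
  ((PySem.List.enumerate s).filter (fun lc => cellP k lc.1)).map (·.2)

def rowO (k : Int) (s : List Char) : List Char :=
  ((PySem.List.enumerate s).filter (fun lc => !cellP k lc.1)).map (·.2)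

theorem rowE_eq (k : Int) (s : List Char) :
    rowE k s = ((List.range s.length).filter (fun (l : Nat) => cellP k (l : Int))).map (fun l => s.getD l ' ') := by
  unfold rowE
  rw [PySem.List.enumerate_eq_map_pyRange s ' ']
  simp only [PySem.List.len_eq, PySem.List.pyRange_zero_natCast, List.map_map, List.filter_map]
  congr 1
  · funext l
    simp

theorem rowO_eq (k : Int) (s : List Char) :
    rowO k s = ((List.range s.length).filter (fun (l : Nat) => !cellP k (l : Int))).map (fun l => s.getD l ' ') := by
  unfold rowO
  rw [PySem.List.enumerate_eq_map_pyRange s ' ']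
  simp only [PySem.List.len_eq, PySem.List.pyRange_zero_natCast, List.map_map, List.filter_map]
  congr 1
  · funext l
    simp

theorem cellP_even (k l : Nat) (hk : k % 2 = 0) : cellP (k : Int) (l : Int) = (l % 2 == 0) := by
  unfold cellP
  have h1 : ((k : Int) + (l : Int)) = ((k + l : Nat) : Int) := by push_cast; ring
  rw [h1]
  have hmc : PySem.Int.mod ((k + l : Nat) : Int) 2 = (((k + l) % 2 : Nat) : Int) := by
    exact_mod_cast PySem.Int.mod_natCast (k + l) 2
  rw [hmc]
  have h : (k + l) % 2 = l % 2 := by omega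
  rw [h]
  by_cases hl : l % 2 = 0
  · simp [hl]
  · have h2 : l % 2 = 1 := by omega
    simp [h2]

theorem cellP_odd (k l : Nat) (hk : k % 2 = 1) : cellP (k : Int) (l : Int) = (l % 2 == 1) := by
  unfold cellP
  have h1 : ((k : Int) + (l : Int)) = ((k + l : Nat) : Int) := by push_cast; ring
  rw [h1]
  have hmc : PySem.Int.mod ((k + l : Nat) : Int) 2 = (((k + l) % 2 : Nat) : Int) := by
    exact_mod_cast PySem.Int.mod_natCast (k + l) 2
  rw [hmc]
  by_cases hl : l % 2 = 0
  · have h : (k + l) % 2 = 1 := by omega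
    simp [h, hl]
  · have h : (k + l) % 2 = 0 := by omega
    have h2 : l % 2 = 1 := by omega
    simp [h, h2]

theorem not_mod_two (l : Nat) : (!(l % 2 == 0)) = (l % 2 == 1) := by
  by_cases hl : l % 2 = 0
  · simp [hl]
  · have h2 : l % 2 = 1 := by omega
    simp [h2]

theorem not_mod_two_odd (l : Nat) : (!(l % 2 == 1)) = (l % 2 == 0) := by
  by_cases hl : l % 2 = 0
  · simp [hl]
  · have h2 : l % 2 = 1 := by omega
    simp [h2]

theorem row_key (s : List Char) (k : Nat) (a b : Char) :
    (if k % 2 = 0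
      then ((List.range s.length).map (aCell s a b)).sum
      else ((List.range s.length).map (aCell s b a)).sum)
    = (((rowE (k : Int) s).length : Int) - ((rowE (k : Int) s).count a : Int))
      + (((rowO (k : Int) s).length : Int) - ((rowO (k : Int) s).count b : Int)) := by
  rw [rowE_eq, rowO_eq]
  rw [List.length_map, List.length_map]
  rw [List.count_eq_countP, List.count_eq_countP, List.countP_map, List.countP_map]
  rw [← List.countP_eq_length_filter, ← List.countP_eq_length_filter]
  rw [List.countP_filter, List.countP_filter]
  simp only [Function.comp_def]
  by_cases hk : k % 2 = 0
  · rw [if_pos hk]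
    unfold aCell
    rw [PySem.List.sum_map_add_int, PySem.List.sum_map_ite_one_zero, PySem.List.sum_map_ite_one_zero]
    rw [List.countP_congr (p := fun (l : Nat) => cellP (k : Int) (l : Int))
        (q := fun (l : Nat) => l % 2 == 0)
        (fun x _ => by beta_reduce; rw [cellP_even k x hk])]
    rw [List.countP_congr (p := fun (l : Nat) => (s.getD l ' ' == a) && cellP (k : Int) (l : Int))
        (q := fun (l : Nat) => (s.getD l ' ' == a) && (l % 2 == 0))
        (fun x _ => by beta_reduce; rw [cellP_even k x hk])]
    rw [List.countP_congr (p := fun (l : Nat) => !cellP (k : Int) (l : Int))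
        (q := fun (l : Nat) => l % 2 == 1)
        (fun x _ => by beta_reduce; rw [cellP_even k x hk, not_mod_two])]
    rw [List.countP_congr (p := fun (l : Nat) => (s.getD l ' ' == b) && !cellP (k : Int) (l : Int))
        (q := fun (l : Nat) => (s.getD l ' ' == b) && (l % 2 == 1))
        (fun x _ => by beta_reduce; rw [cellP_even k x hk, not_mod_two])]
    rw [cnt_split (List.range s.length) (fun l => l % 2 == 0) (fun l => s.getD l ' ') a,
      cnt_split (List.range s.length) (fun l => l % 2 == 1) (fun l => s.getD l ' ') b]
  · rw [if_neg hk]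
    have hk1 : k % 2 = 1 := by omega
    unfold aCell
    rw [PySem.List.sum_map_add_int, PySem.List.sum_map_ite_one_zero, PySem.List.sum_map_ite_one_zero]
    rw [List.countP_congr (p := fun (l : Nat) => cellP (k : Int) (l : Int))
        (q := fun (l : Nat) => l % 2 == 1)
        (fun x _ => by beta_reduce; rw [cellP_odd k x hk1])]
    rw [List.countP_congr (p := fun (l : Nat) => (s.getD l ' ' == a) && cellP (k : Int) (l : Int))
        (q := fun (l : Nat) => (s.getD l ' ' == a) && (l % 2 == 1))
        (fun x _ => by beta_reduce; rw [cellP_odd k x hk1])]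
    rw [List.countP_congr (p := fun (l : Nat) => !cellP (k : Int) (l : Int))
        (q := fun (l : Nat) => l % 2 == 0)
        (fun x _ => by beta_reduce; rw [cellP_odd k x hk1, not_mod_two_odd])]
    rw [List.countP_congr (p := fun (l : Nat) => (s.getD l ' ' == b) && !cellP (k : Int) (l : Int))
        (q := fun (l : Nat) => (s.getD l ' ' == b) && (l % 2 == 0))
        (fun x _ => by beta_reduce; rw [cellP_odd k x hk1, not_mod_two_odd])]
    rw [cnt_split (List.range s.length) (fun l => l % 2 == 1) (fun l => s.getD l ' ') a,
      cnt_split (List.range s.length) (fun l => l % 2 == 0) (fun l => s.getD l ' ') b]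
    ring

theorem cells_flat (floor : List String) :
    pyCells floor =
      ((List.range floor.length).flatMap (fun (k : Nat) => rowE (k : Int) (PySem.List.pyGetD floor (k : Int) "").toList),
       (List.range floor.length).flatMap (fun (k : Nat) => rowO (k : Int) (PySem.List.pyGetD floor (k : Int) "").toList)) := by
  rw [cells_eq, PySem.List.enumerate_eq_map_pyRange floor ""]
  simp only [PySem.List.len_eq, PySem.List.pyRange_zero_natCast, List.flatMap_map]
  rfl

-- B's fix value for the ordered pair (a, b), written out
def bFix (floor : List String) (a b : Char) : Int :=
  (PySem.List.len (pyCells floor).1 - (pyCounter (pyCells floor).1).getD a 0) +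
  (PySem.List.len (pyCells floor).2 - (pyCounter (pyCells floor).2).getD b 0)

theorem bFix_eq_sum (floor : List String) (a b : Char) :
    bFix floor a b
      = ((List.range floor.length).map (fun (k : Nat) =>
          ((((rowE (k : Int) (PySem.List.pyGetD floor (k : Int) "").toList).length : Int)
            - ((rowE (k : Int) (PySem.List.pyGetD floor (k : Int) "").toList).count a : Int))
          + (((rowO (k : Int) (PySem.List.pyGetD floor (k : Int) "").toList).length : Int)
            - ((rowO (k : Int) (PySem.List.pyGetD floor (k : Int) "").toList).count b : Int))))).sum := by
  unfold bFix
  rw [cells_flat]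
  simp only [PySem.List.len_eq, counter_getD, List.length_flatMap, List.count_flatMap,
    Nat.cast_list_sum, List.map_map]
  rw [PySem.List.sum_map_add_int]
  rw [sum_map_sub_int, sum_map_sub_int]
  rfl

theorem key_fix (floor : List String) (a b : Char) :
    pyAFix floor a b = (bFix floor a b, bFix floor b a) := by
  have comp : ∀ x y : Char,
      ((PySem.List.pyRange 0 (PySem.List.len floor) 2).map (aRowSum floor x y)).sum
        + ((PySem.List.pyRange 1 (PySem.List.len floor) 2).map (aRowSum floor y x)).sum
      = bFix floor x y := by
    intro x y
    rw [PySem.List.len_eq, merge_parity floor.length (aRowSum floor x y) (aRowSum floor y x),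
      bFix_eq_sum]
    apply congrArg List.sum
    apply List.map_congr_left
    intro k _
    have h := row_key (PySem.List.pyGetD floor (k : Int) "").toList k x y
    simp only [aRowSum]
    exact h
  rw [pyAFix_eq]
  rw [comp a b, comp b a]

-- ===== VERDICT (by name: the statement is the Claim_ definition above) =====
theorem minimumChanges_spec : Claim_equal_minimumChanges := by
  intro floor _
  unfold Spec_minimumChanges minimumChanges minimumChanges_alt
  apply PySem.List.foldl_congr_mem
  intro mc i _
  apply PySem.List.foldl_congr_mem
  intro mc j _
  simp only [key_fix, bFix]
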